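-- pv_equiv track=rewrite | github.com/winan305/Algorithm | KaKaoTest.py | getPartList
-- ===== SOURCE A (Python) =====
-- def check(c) :
--     if c >= 'a' and c <= 'z' : return True
--     return False
--
-- def getPartList(str) :
--     str = str.lower()
--     result = []
--     i = 0
--     while i+1 < len(str) :
--         if check(str[i]) and check(str[i+1]) :
--             result.append(str[i] + str[i+1])
--         i += 1
--     return result
-- ===== SOURCE B (Python) =====
-- def getPartList(str):
--     # Stage 1: split the lowered string into maximal runs of lowercase letters.
--     # Stage 2: expand each run of length L into its L-1 adjacent pairs.
--     s = str.lower()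
--     runs = []
--     cur = ''
--     for c in s:
--         if 'a' <= c <= 'z':
--             cur += c
--         else:
--             if cur:
--                 runs.append(cur)
--             cur = ''
--     if cur:
--         runs.append(cur)
--     return [r[j:j+2] for r in runs for j in range(len(r) - 1)]
-- ===== Notes on version B (the rewrite author's own statement) =====
-- stated objective: alternative
-- what changed: Instead of scanning index pairs with a while loop, B first splits the lowered string into maximal runs of consecutive lowercase letters and then expands each run of length L into its L-1 adjacent substrings.
import Mathlib
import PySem

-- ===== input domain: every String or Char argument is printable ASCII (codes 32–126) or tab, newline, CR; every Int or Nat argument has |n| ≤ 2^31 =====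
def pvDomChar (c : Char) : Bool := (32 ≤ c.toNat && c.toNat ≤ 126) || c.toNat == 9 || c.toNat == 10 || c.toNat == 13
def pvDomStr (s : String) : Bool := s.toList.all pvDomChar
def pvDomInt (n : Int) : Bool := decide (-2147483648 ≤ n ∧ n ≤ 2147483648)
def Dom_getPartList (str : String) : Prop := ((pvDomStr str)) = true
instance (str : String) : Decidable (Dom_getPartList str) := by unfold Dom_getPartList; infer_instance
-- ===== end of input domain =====

-- B replaces the index-pair scan by a two-stage algorithm: split into maximal lowercase runs, then expand each run into its adjacent pairs; same cost, different structure.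

-- ===== PORT A =====
-- helper 'check'
def pvCheck (c : Char) : Bool := if 'a' ≤ c ∧ c ≤ 'z' then true else false

-- the while loop: i steps while i+1 < len; appends str[i] + str[i+1] when both pass check
def pvLoopA (cs : List Char) (i : Nat) (result : List String) : List String :=
  if h : i + 1 < cs.length then
    pvLoopA cs (i + 1)
      (if pvCheck cs[i] && pvCheck cs[i+1] then result ++ [String.mk [cs[i], cs[i+1]]] else result)
  else result
termination_by cs.length - i

def getPartList (str : String) : List String :=
  let s := (PySem.Str.lower str).toList
  pvLoopA s 0 []

-- ===== PORT B =====
-- Stage 1 of Source B: the for-loop over s with state (runs, cur); 'cur += c' appends, a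
-- non-letter flushes cur into runs; a final nonempty cur is flushed after the loop.
def pvRunsB (cs : List Char) (runs : List (List Char)) (cur : List Char) : List (List Char) :=
  match cs with
  | [] => if cur ≠ [] then runs ++ [cur] else runs
  | c :: rest =>
    if 'a' ≤ c && c ≤ 'z' then pvRunsB rest runs (cur ++ [c])
    else pvRunsB rest (if cur ≠ [] then runs ++ [cur] else runs) []

-- r[j:j+2] for 0 ≤ j: exact as take 2 (drop j)
def pvRunPairsB (r : List Char) : List String :=
  (List.range (r.length - 1)).map (fun j => String.mk ((r.drop j).take 2))

def getPartList_alt (str : String) : List String :=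
  let s := (PySem.Str.lower str).toList
  (pvRunsB s [] []).flatMap pvRunPairsB

-- ===== PRECONDITION & SPEC =====
def Spec_getPartList (str : String) (out : List String) : Prop := out = getPartList_alt str
instance (str : String) (out : List String) : Decidable (Spec_getPartList str out) := by unfold Spec_getPartList; infer_instance

-- ===== CLAIM (what is proved, stated in full; the proofs are below) =====
def Claim_equal_getPartList : Prop := ∀ (str : String), Dom_getPartList str → Spec_getPartList str (getPartList str)

-- ===== LEMMAS AND PROOFS =====
def pvLow (c : Char) : Bool := 'a' ≤ c && c ≤ 'z'

-- characterisation of A's loop as the pair list of the suffix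
def pvPairs (cs : List Char) : List String :=
  match cs with
  | a :: b :: rest =>
      (if pvLow a && pvLow b then [String.mk [a, b]] else []) ++ pvPairs (b :: rest)
  | _ => []

theorem pvLoopA_eq (cs : List Char) (i : Nat) (acc : List String) :
    pvLoopA cs i acc = acc ++ pvPairs (cs.drop i) := by
  fun_induction pvLoopA cs i acc with
  | case1 i acc h ih =>
    simp only [dite_eq_ite] at ih
    rw [ih]
    have h1 : i < cs.length := by omega
    have hd : cs.drop i = cs[i] :: cs.drop (i + 1) := List.drop_eq_getElem_cons h1
    have hd2 : cs.drop (i + 1) = cs[i + 1] :: cs.drop (i + 2) := List.drop_eq_getElem_cons h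
    rw [hd, hd2, ← hd2]
    have hc : ∀ c : Char, pvCheck c = pvLow c := by intro c; simp [pvCheck, pvLow]
    rw [hd2, pvPairs, ← hd2]
    simp only [hc]
    split <;> simp
  | case2 i acc h =>
    rcases Nat.lt_or_ge i cs.length with h2 | h2
    · have : cs.drop i = [cs[i]] := by
        have := List.drop_eq_getElem_cons h2
        rw [this, List.drop_eq_nil_of_le (by omega)]
      rw [this]; simp [pvPairs]
    · rw [List.drop_eq_nil_of_le h2]; simp [pvPairs]

theorem pvRunPairsB_nil : pvRunPairsB [] = [] := by simp [pvRunPairsB]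

theorem pvRunPairsB_single (a : Char) : pvRunPairsB [a] = [] := by simp [pvRunPairsB]

theorem pvRunPairsB_cons_cons (a b : Char) (t : List Char) :
    pvRunPairsB (a :: b :: t) = String.mk [a, b] :: pvRunPairsB (b :: t) := by
  simp [pvRunPairsB, List.range_succ_eq_map, List.map_map, Function.comp]

-- within an all-lowercase list, A's pair list is exactly the run expansion
theorem pvPairs_all_low (r : List Char) (hr : ∀ c ∈ r, pvLow c = true) :
    pvPairs r = pvRunPairsB r := by
  match r with
  | [] => simp [pvPairs, pvRunPairsB_nil]
  | [a] => simp [pvPairs, pvRunPairsB_single]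
  | a :: b :: t =>
    rw [pvPairs, pvRunPairsB_cons_cons, pvPairs_all_low (b :: t) (by intro c hc; exact hr c (by simp_all))]
    have ha := hr a (by simp)
    have hb := hr b (by simp)
    simp [ha, hb]

theorem pvPairs_cons_not_low (c : Char) (rest : List Char) (hc : pvLow c = false) :
    pvPairs (c :: rest) = pvPairs rest := by
  match rest with
  | [] => simp [pvPairs]
  | d :: t => rw [pvPairs]; simp [hc]

-- splitting A's pair list at a non-letter after an all-lowercase prefix
theorem pvPairs_split (cur : List Char) (c : Char) (rest : List Char)
    (hcur : ∀ x ∈ cur, pvLow x = true) (hc : pvLow c = false) :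
    pvPairs (cur ++ c :: rest) = pvRunPairsB cur ++ pvPairs rest := by
  match cur with
  | [] => simp [pvRunPairsB_nil, pvPairs_cons_not_low c rest hc]
  | [a] =>
    rw [List.singleton_append, pvPairs, pvRunPairsB_single]
    simp [hc, pvPairs_cons_not_low c rest hc]
  | a :: b :: t =>
    have ha := hcur a (by simp)
    have hb := hcur b (by simp)
    rw [List.cons_append, List.cons_append, pvPairs, ← List.cons_append,
      pvPairs_split (b :: t) c rest (by intro x hx; exact hcur x (by simp_all)) hc,
      pvRunPairsB_cons_cons]
    simp [ha, hb]

-- main invariant of B's stage-1 loop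
theorem pvRunsB_invariant (cs : List Char) (runs : List (List Char)) (cur : List Char)
    (hcur : ∀ x ∈ cur, pvLow x = true) :
    (pvRunsB cs runs cur).flatMap pvRunPairsB =
      runs.flatMap pvRunPairsB ++ pvPairs (cur ++ cs) := by
  match cs with
  | [] =>
    rw [pvRunsB, List.append_nil, pvPairs_all_low cur hcur]
    by_cases h : cur = []
    · simp [h, pvRunPairsB_nil]
    · simp [h]
  | c :: rest =>
    rw [pvRunsB]
    by_cases h : pvLow c = true
    · rw [if_pos (by simpa [pvLow] using h),
        pvRunsB_invariant rest runs (cur ++ [c]) (by intro x hx; rcases List.mem_append.mp hx with h1 | h1; exacts [hcur x h1, by simp_all])]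
      simp
    · have h' : pvLow c = false := by simpa using h
      rw [if_neg (by simp [pvLow] at h' ⊢; omega),
        pvRunsB_invariant rest _ [] (by simp),
        pvPairs_split cur c rest hcur h']
      by_cases hc : cur = []
      · simp [hc, pvRunPairsB_nil]
      · simp [hc]

-- ===== VERDICT (by name: the statement is the Claim_ definition above) =====
theorem getPartList_spec : Claim_equal_getPartList := by
  intro str _
  show getPartList str = getPartList_alt str
  unfold getPartList getPartList_alt
  rw [pvLoopA_eq, pvRunsB_invariant _ _ _ (by simp)]
  simp
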